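-- pv_equiv track=rewrite | github.com/MarioUTN/ADA | py/Trabajo_03_Recursividad/06_ArregloA_ContenidoB.py | ArregloA_ContenidoB
-- ===== SOURCE A (Python) =====
-- def ArregloA_ContenidoB(A,B,a,b,cont):
--     if(a<len(A) and b<len(B) and len(A)<=len(B)):
--         if(A[a] == B[b]):
--             a+=1
--             b=0
--             cont+=1
--         else:
--             b+=1
--         return ArregloA_ContenidoB(A, B, a, b, cont)
--     else:
--         return cont
-- ===== SOURCE B (Python) =====
-- def ArregloA_ContenidoB(A, B, a, b, cont):
--     if len(A) > len(B):
--         return cont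
--     while a < len(A) and b < len(B):
--         while b < len(B) and A[a] != B[b]:
--             b += 1
--         if b < len(B):
--             a += 1
--             b = 0
--             cont += 1
--     return cont
-- ===== Notes on version B (the rewrite author's own statement) =====
-- stated objective: simpler
-- what changed: Replaces A's deep one-step-per-call tail recursion with iterative nested while loops (an inner loop scanning B for the current element, an outer loop advancing through A), with the length guard checked once up front; Pre_ excludes only the inputs where A raises IndexError (loop entered with an index below the negative-wrap range).
import Mathlib
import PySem

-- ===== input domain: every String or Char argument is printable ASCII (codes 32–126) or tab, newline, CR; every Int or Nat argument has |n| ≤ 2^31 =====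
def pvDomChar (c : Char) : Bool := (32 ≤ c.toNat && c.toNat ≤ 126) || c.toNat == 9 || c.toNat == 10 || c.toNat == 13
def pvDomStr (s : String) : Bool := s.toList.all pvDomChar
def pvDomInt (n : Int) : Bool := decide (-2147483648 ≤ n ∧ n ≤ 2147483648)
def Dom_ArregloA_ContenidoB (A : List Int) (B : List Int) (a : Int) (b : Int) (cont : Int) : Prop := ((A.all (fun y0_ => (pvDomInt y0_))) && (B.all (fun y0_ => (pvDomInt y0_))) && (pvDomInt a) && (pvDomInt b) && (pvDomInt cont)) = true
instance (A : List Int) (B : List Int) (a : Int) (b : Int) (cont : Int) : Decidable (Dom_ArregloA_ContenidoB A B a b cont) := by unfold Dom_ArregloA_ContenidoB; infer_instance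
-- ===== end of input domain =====

-- B replaces A's deep element-at-a-time tail recursion by iterative nested loops
-- (inner loop scans B, outer loop advances through A). Objective: simpler, no recursion.

-- ===== PORT A =====
-- literal transliteration of A's tail recursion; the '| _, _ => cont' arm is where
-- Python raises IndexError (index below the negative-wrap range) — excluded by Pre_.
def ArregloA_ContenidoB (A : List Int) (B : List Int) (a : Int) (b : Int) (cont : Int) : Int :=
  if h : a < PySem.List.len A ∧ b < PySem.List.len B ∧ PySem.List.len A ≤ PySem.List.len B then
    match PySem.List.pyGet? A a, PySem.List.pyGet? B b with
    | some x, some y =>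
        if x = y then ArregloA_ContenidoB A B (a + 1) 0 (cont + 1)
        else ArregloA_ContenidoB A B a (b + 1) cont
    | _, _ => cont
  else cont
termination_by ((PySem.List.len A - a).toNat, (PySem.List.len B - b).toNat)
decreasing_by
  · exact Prod.Lex.left _ _ (by simp [PySem.List.len] at h ⊢; omega)
  · exact Prod.Lex.right _ (by simp [PySem.List.len] at h ⊢; omega)

-- ===== PORT B =====
-- the inner 'while b < len(B) and A[a] != B[b]: b += 1' loop: returns the final b
-- (on IndexError — only outside Pre_ — it stops at the current b)
def pvScan (A : List Int) (B : List Int) (a : Int) (b : Int) : Int :=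
  if h : b < PySem.List.len B then
    match PySem.List.pyGet? A a with
    | none => b
    | some x =>
      match PySem.List.pyGet? B b with
      | none => b
      | some y => if x ≠ y then pvScan A B a (b + 1) else b
  else b
termination_by (PySem.List.len B - b).toNat
decreasing_by simp [PySem.List.len] at h ⊢; omega

-- the outer 'while a < len(A) and b < len(B):' loop
def pvRun (A : List Int) (B : List Int) (a : Int) (b : Int) (cont : Int) : Int :=
  if h : a < PySem.List.len A ∧ b < PySem.List.len B then
    let b' := pvScan A B a b
    if b' < PySem.List.len B then pvRun A B (a + 1) 0 (cont + 1) else cont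
  else cont
termination_by (PySem.List.len A - a).toNat
decreasing_by simp [PySem.List.len] at h ⊢; omega

def ArregloA_ContenidoB_alt (A : List Int) (B : List Int) (a : Int) (b : Int) (cont : Int) : Int :=
  if PySem.List.len A > PySem.List.len B then cont
  else pvRun A B a b cont

-- ===== PRECONDITION & SPEC =====
-- Pre_ excludes exactly the inputs where A raises IndexError: the loop is entered
-- (a < len A, b < len B, len A ≤ len B) with a or b below the negative-wrap range.
def Pre_ArregloA_ContenidoB (A : List Int) (B : List Int) (a : Int) (b : Int) (cont : Int) : Prop :=
  ¬ (a < (A.length : Int) ∧ b < (B.length : Int) ∧ (A.length : Int) ≤ (B.length : Int) ∧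
     (a < -(A.length : Int) ∨ b < -(B.length : Int)))
instance (A : List Int) (B : List Int) (a : Int) (b : Int) (cont : Int) : Decidable (Pre_ArregloA_ContenidoB A B a b cont) := by unfold Pre_ArregloA_ContenidoB; infer_instance

def pvWitness_ArregloA_ContenidoB : List Int × List Int × Int × Int × Int := ([1, 2], [2, 1, 3], 0, 0, 0)

def Spec_ArregloA_ContenidoB (A : List Int) (B : List Int) (a : Int) (b : Int) (cont : Int) (out : Int) : Prop := out = ArregloA_ContenidoB_alt A B a b cont
instance (A : List Int) (B : List Int) (a : Int) (b : Int) (cont : Int) (out : Int) : Decidable (Spec_ArregloA_ContenidoB A B a b cont out) := by unfold Spec_ArregloA_ContenidoB; infer_instance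

-- ===== CLAIM (what is proved, stated in full; the proofs are below) =====
def Claim_equal_ArregloA_ContenidoB : Prop := ∀ (A : List Int) (B : List Int) (a : Int) (b : Int) (cont : Int), Dom_ArregloA_ContenidoB A B a b cont → Pre_ArregloA_ContenidoB A B a b cont → Spec_ArregloA_ContenidoB A B a b cont (ArregloA_ContenidoB A B a b cont)

-- ===== LEMMAS AND PROOFS =====

lemma pyGet?_some_of_inrange (l : List Int) (i : Int) (h1 : -(l.length : Int) ≤ i)
    (h2 : i < (l.length : Int)) : ∃ x, PySem.List.pyGet? l i = some x := by
  have : ¬ PySem.List.pyGet? l i = none := by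
    rw [PySem.List.pyGet?_eq_none_iff]
    intro hn
    exact hn ⟨h1, h2⟩
  cases h : PySem.List.pyGet? l i with
  | none => exact absurd h this
  | some x => exact ⟨x, rfl⟩

-- one step / the stop case of the inner scan loop
lemma pvScan_step (A B : List Int) (a b : Int) (hb : b < (B.length : Int)) (x y : Int)
    (hx : PySem.List.pyGet? A a = some x) (hy : PySem.List.pyGet? B b = some y) :
    pvScan A B a b = if x = y then b else pvScan A B a (b + 1) := by
  rw [pvScan]
  simp only [PySem.List.len_eq]
  rw [dif_pos hb, hx, hy]
  by_cases h : x = y <;> simp [h]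

lemma pvScan_stop (A B : List Int) (a b : Int) (hb : ¬ b < (B.length : Int)) :
    pvScan A B a b = b := by
  rw [pvScan]
  simp only [PySem.List.len_eq]
  rw [dif_neg hb]

-- A's recursion equals B's nested loops, for in-range indices under len A ≤ len B
lemma A_eq_run (A B : List Int) : ∀ (k : Nat) (a b cont : Int),
    k = ((A.length : Int) - a).toNat * (B.length + 1) + ((B.length : Int) - b).toNat →
    -(A.length : Int) ≤ a → -(B.length : Int) ≤ b → (A.length : Int) ≤ (B.length : Int) →
    ArregloA_ContenidoB A B a b cont = pvRun A B a b cont := by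
  intro k
  induction k using Nat.strong_induction_on with
  | _ k IH =>
    intro a b cont hk ha hb hlen
    by_cases hg : a < (A.length : Int) ∧ b < (B.length : Int)
    · obtain ⟨x, hx⟩ := pyGet?_some_of_inrange A a ha hg.1
      obtain ⟨y, hy⟩ := pyGet?_some_of_inrange B b hb hg.2
      rw [ArregloA_ContenidoB, pvRun]
      simp only [PySem.List.len_eq]
      rw [dif_pos ⟨hg.1, hg.2, hlen⟩, dif_pos hg, hx, hy]
      dsimp only
      rw [pvScan_step A B a b hg.2 x y hx hy]
      by_cases hxy : x = y
      · rw [if_pos hxy, if_pos hxy, if_pos hg.2]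
        have hsplit : ((A.length : Int) - a).toNat = ((A.length : Int) - (a + 1)).toNat + 1 := by omega
        rw [hsplit, Nat.succ_mul] at hk
        exact IH _ (by omega) (a + 1) 0 (cont + 1) rfl (by omega) (by omega) hlen
      · rw [if_neg hxy, if_neg hxy]
        rw [IH _ (by omega) a (b + 1) cont rfl ha (by omega) hlen]
        by_cases hb' : b + 1 < (B.length : Int)
        · rw [pvRun]
          simp only [PySem.List.len_eq]
          rw [dif_pos ⟨hg.1, hb'⟩]
        · rw [pvScan_stop A B a (b + 1) hb', if_neg hb', pvRun]
          simp only [PySem.List.len_eq]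
          rw [dif_neg (by omega : ¬ (a < (A.length : Int) ∧ b + 1 < (B.length : Int)))]
    · rw [ArregloA_ContenidoB, pvRun]
      simp only [PySem.List.len_eq]
      rw [dif_neg (by tauto : ¬ (a < (A.length : Int) ∧ b < (B.length : Int) ∧ (A.length : Int) ≤ (B.length : Int))), dif_neg hg]

-- ===== VERDICT (by name: the statement is the Claim_ definition above) =====
theorem ArregloA_ContenidoB_spec : Claim_equal_ArregloA_ContenidoB := by
  intro A B a b cont _ hp
  unfold Spec_ArregloA_ContenidoB
  unfold Pre_ArregloA_ContenidoB at hp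
  unfold ArregloA_ContenidoB_alt
  simp only [PySem.List.len_eq]
  by_cases hlen : (A.length : Int) ≤ (B.length : Int)
  · rw [if_neg (by omega)]
    by_cases hg : a < (A.length : Int) ∧ b < (B.length : Int)
    · exact A_eq_run A B _ a b cont rfl (by omega) (by omega) hlen
    · rw [ArregloA_ContenidoB, pvRun]
      simp only [PySem.List.len_eq]
      rw [dif_neg (by tauto), dif_neg hg]
  · rw [if_pos (by omega), ArregloA_ContenidoB]
    simp only [PySem.List.len_eq]
    rw [dif_neg (by omega)]
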